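-- pv_equiv track=rewrite | github.com/santha22/PythonPrograms | GFG/Arrays/maximumOccurringDigit.py | maxoccourence
-- ===== SOURCE A (Python) =====
-- def maxoccourence (arr, n, k):
--
--     #code here
--     ans = 0
--     maxi = 0
--
--     for item in arr:
--         count = 0
--         for it in str(item):
--             if k == int(it):
--                 count += 1
--         if count > maxi:
--             maxi = count
--             ans = item
--
--         elif count == maxi and item < ans:
--             ans = item
--
--     return ans
-- ===== SOURCE B (Python) =====
-- def maxoccourence(arr, n, k):
--     def cnt(item):
--         return sum(1 for ch in str(item) if int(ch) == k)
--     counts = [cnt(x) for x in arr]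
--     best = max(counts, default=0)
--     cand = [x for x, c in zip(arr, counts) if c == best]
--     if best == 0:
--         cand.append(0)
--     return min(cand)
-- ===== Notes on version B (the rewrite author's own statement) =====
-- stated objective: alternative
-- what changed: Replaces A's single-pass running-max/tie-break state machine by a two-phase decomposition: compute all digit-k counts, take the maximum count, then return the minimum element among those attaining it (with the 0 sentinel kept only when no digit matches anywhere).
import Mathlib
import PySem

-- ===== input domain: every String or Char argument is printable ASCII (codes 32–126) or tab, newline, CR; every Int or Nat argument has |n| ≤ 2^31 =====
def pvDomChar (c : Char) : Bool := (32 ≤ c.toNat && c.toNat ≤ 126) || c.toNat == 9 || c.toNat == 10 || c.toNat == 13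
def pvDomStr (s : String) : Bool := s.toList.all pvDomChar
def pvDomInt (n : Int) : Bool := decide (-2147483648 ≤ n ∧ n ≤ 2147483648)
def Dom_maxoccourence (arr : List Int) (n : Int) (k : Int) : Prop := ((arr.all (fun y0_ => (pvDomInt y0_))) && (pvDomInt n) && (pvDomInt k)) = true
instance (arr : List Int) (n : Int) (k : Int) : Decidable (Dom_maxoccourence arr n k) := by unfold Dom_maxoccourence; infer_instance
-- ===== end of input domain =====

-- B replaces A's single-pass running-max/tie-break scan by a two-phase decomposition
-- (all counts first, then max count, then min element attaining it); objective: alternative.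

-- int(ch) for a single character (both Pythons parse each digit character with int)
def pvIntOfCh (c : Char) : Int := (PySem.Int.ofChars? [c]).getD 0

-- ===== PORT A =====
-- A's loop body: count digit-k occurrences of str(item), then update (ans, maxi)
def pvStepA (k : Int) (s : Int × Int) (item : Int) : Int × Int :=
  let count := (PySem.Int.toChars item).foldl
    (fun c it => if k = pvIntOfCh it then c + 1 else c) (0 : Int)
  if count > s.2 then (item, count)
  else if count = s.2 ∧ item < s.1 then (item, s.2)
  else s

def maxoccourence (arr : List Int) (n : Int) (k : Int) : Int :=
  (arr.foldl (pvStepA k) ((0 : Int), (0 : Int))).1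

-- ===== PORT B =====
-- B's cnt(item): sum(1 for ch in str(item) if int(ch) == k)
def pvCnt (k item : Int) : Int :=
  (((PySem.Int.toChars item).filter (fun c => pvIntOfCh c == k)).length : Int)

def maxoccourence_alt (arr : List Int) (n : Int) (k : Int) : Int :=
  let counts := arr.map (pvCnt k)
  let best := (PySem.List.max? counts (fun x => x)).getD 0
  let cand := (arr.zip counts).filterMap (fun p => if p.2 = best then some p.1 else none)
  let cand2 := if best = 0 then cand ++ [0] else cand
  (PySem.List.min? cand2 (fun x => x)).getD 0

-- ===== PRECONDITION & SPEC =====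
-- Pre_ excludes arrays containing a negative element: there str(item) starts with '-'
-- and A's int(it) raises ValueError (B raises the same way).
def Pre_maxoccourence (arr : List Int) (n : Int) (k : Int) : Prop :=
  ∀ x ∈ arr, 0 ≤ x
instance (arr : List Int) (n : Int) (k : Int) : Decidable (Pre_maxoccourence arr n k) := by
  unfold Pre_maxoccourence; infer_instance

def pvWitness_maxoccourence : List Int × Int × Int := ([12, 21, 2, 305], 4, 2)

def Spec_maxoccourence (arr : List Int) (n : Int) (k : Int) (out : Int) : Prop := out = maxoccourence_alt arr n k
instance (arr : List Int) (n : Int) (k : Int) (out : Int) : Decidable (Spec_maxoccourence arr n k out) := by unfold Spec_maxoccourence; infer_instance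

-- ===== CLAIM (what is proved, stated in full; the proofs are below) =====
def Claim_equal_maxoccourence : Prop := ∀ (arr : List Int) (n : Int) (k : Int), Dom_maxoccourence arr n k → Pre_maxoccourence arr n k → Spec_maxoccourence arr n k (maxoccourence arr n k)

-- ===== LEMMAS AND PROOFS =====

-- max count of digit k over the list, seeded with 0 (value-level characterisation)
def pvM (k : Int) (l : List Int) : Int :=
  l.foldl (fun m x => max m (pvCnt k x)) 0

-- min of a nonempty list (0 on [], never used there)
def pvListMin : List Int → Int
  | [] => 0
  | x :: t => t.foldl min x

-- the candidate list B builds, written seed-first for the invariant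
def pvCand (k : Int) (l : List Int) : List Int :=
  l.filter (fun x => pvCnt k x == pvM k l)

lemma pvCnt_nonneg (k x : Int) : 0 ≤ pvCnt k x := by
  simp [pvCnt]

lemma pvM_eq_foldl_map (k : Int) (l : List Int) :
    pvM k l = (l.map (pvCnt k)).foldl max 0 := by
  rw [pvM, List.foldl_map]

lemma pvM_nonneg (k : Int) (l : List Int) : 0 ≤ pvM k l := by
  rw [pvM_eq_foldl_map]
  exact (PySem.List.le_foldl_max _ _).1

lemma pvCnt_le_pvM (k : Int) {l : List Int} {x : Int} (hx : x ∈ l) : pvCnt k x ≤ pvM k l := by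
  rw [pvM_eq_foldl_map]
  exact (PySem.List.le_foldl_max _ _).2 _ (List.mem_map_of_mem hx)

lemma foldl_max_attained (l : List Int) (a : Int) :
    l.foldl max a = a ∨ l.foldl max a ∈ l := by
  induction l generalizing a with
  | nil => exact Or.inl rfl
  | cons c t ih =>
    simp only [List.foldl_cons]
    rcases ih (max a c) with h | h
    · rw [h]
      rcases max_cases a c with ⟨he, _⟩ | ⟨he, _⟩
      · exact Or.inl he
      · exact Or.inr (by rw [he]; exact List.mem_cons_self)
    · exact Or.inr (List.mem_cons_of_mem _ h)

lemma pvM_attained (k : Int) (l : List Int) (h : 0 < pvM k l) :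
    ∃ x ∈ l, pvCnt k x = pvM k l := by
  have hm := pvM_eq_foldl_map k l
  rcases foldl_max_attained (l.map (pvCnt k)) 0 with h0 | hmem
  · rw [hm, h0] at h; exact absurd h (by omega)
  · rw [← hm] at hmem
    rcases List.mem_map.mp hmem with ⟨x, hx, hcx⟩
    exact ⟨x, hx, hcx⟩

lemma foldl_min_min (t : List Int) (a b : Int) :
    t.foldl min (min a b) = min (t.foldl min a) b := by
  induction t generalizing a with
  | nil => rfl
  | cons c t ih =>
    simp only [List.foldl_cons]
    rw [show min (min a b) c = min (min a c) b by
          rw [min_assoc, min_comm b c, ← min_assoc], ih]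

lemma pvListMin_append_singleton (xs : List Int) (z : Int) (h : xs ≠ []) :
    pvListMin (xs ++ [z]) = min (pvListMin xs) z := by
  cases xs with
  | nil => exact absurd rfl h
  | cons x t => simp [pvListMin, List.foldl_append]

-- A's inner loop is pvCnt
lemma countA_eq_pvCnt (k item : Int) :
    (PySem.Int.toChars item).foldl
      (fun c it => if k = pvIntOfCh it then c + 1 else c) (0 : Int) = pvCnt k item := by
  have h := PySem.List.foldl_if_add_one (fun it => pvIntOfCh it == k) (PySem.Int.toChars item) 0
  simp only [beq_iff_eq] at h
  rw [show (fun (c : Int) it => if k = pvIntOfCh it then c + 1 else c)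
        = (fun (c : Int) it => if pvIntOfCh it = k then c + 1 else c) by
      funext c it; simp [eq_comm]]
  rw [h, List.countP_eq_length_filter, pvCnt]
  simp

-- the invariant: A's fold computes (min of seed-first candidates, max count)
lemma foldA_char (k : Int) (l : List Int) :
    l.foldl (pvStepA k) ((0 : Int), (0 : Int)) =
      (pvListMin ((if pvM k l = 0 then [0] else []) ++ pvCand k l), pvM k l) := by
  induction l using List.reverseRecOn with
  | nil => simp [pvM, pvCand, pvListMin]
  | append_singleton l x ih =>
    rw [List.foldl_append, List.foldl_cons, List.foldl_nil, ih]
    have hc0 : 0 ≤ pvCnt k x := pvCnt_nonneg k x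
    have hm0 : 0 ≤ pvM k l := pvM_nonneg k l
    have hM : pvM k (l ++ [x]) = max (pvM k l) (pvCnt k x) := by
      simp [pvM, List.foldl_append]
    have hne : (if pvM k l = 0 then [0] else []) ++ pvCand k l ≠ [] := by
      by_cases hm : pvM k l = 0
      · simp [hm]
      · obtain ⟨y, hy, hcy⟩ := pvM_attained k l (lt_of_le_of_ne hm0 (Ne.symm hm))
        have : y ∈ pvCand k l := by
          simp [pvCand, List.mem_filter, hy, hcy]
        intro h
        rw [if_neg hm, List.nil_append] at h
        simp [h] at this
    rw [pvStepA, countA_eq_pvCnt]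
    rcases lt_trichotomy (pvCnt k x) (pvM k l) with hlt | heq | hgt
    · -- count below the running max: state unchanged
      have h1 : ¬ pvCnt k x > pvM k l := by omega
      have h2 : ¬ pvCnt k x = pvM k l := by omega
      have hMx : pvM k (l ++ [x]) = pvM k l := by rw [hM]; omega
      have hCand : pvCand k (l ++ [x]) = pvCand k l := by
        rw [pvCand, hMx, List.filter_append, pvCand]
        simp [h2]
      simp only [hMx, hCand, if_neg h1, h2, false_and]
      simp
    · -- tie: A keeps the smaller item, B's min absorbs x
      have h1 : ¬ pvCnt k x > pvM k l := by omega
      have hMx : pvM k (l ++ [x]) = pvM k l := by rw [hM]; omega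
      have hCand : pvCand k (l ++ [x]) = pvCand k l ++ [x] := by
        rw [pvCand, hMx, List.filter_append, pvCand]
        simp [heq]
      have hmin : pvListMin ((if pvM k l = 0 then [0] else []) ++ pvCand k (l ++ [x]))
          = min (pvListMin ((if pvM k l = 0 then [0] else []) ++ pvCand k l)) x := by
        rw [hCand, ← List.append_assoc, pvListMin_append_singleton _ _ hne]
      simp only [hMx, hmin, heq]
      by_cases hx : x < pvListMin ((if pvM k l = 0 then [0] else []) ++ pvCand k l)
      · simp [hx, min_eq_right (le_of_lt hx)]
      · simp [hx, min_eq_left (le_of_not_gt hx)]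
    · -- strictly larger count: x becomes the unique candidate
      have hMx : pvM k (l ++ [x]) = pvCnt k x := by rw [hM]; omega
      have hCand : pvCand k (l ++ [x]) = [x] := by
        rw [pvCand, hMx, List.filter_append]
        have hnil : l.filter (fun y => pvCnt k y == pvCnt k x) = [] := by
          rw [List.filter_eq_nil_iff]
          intro y hy
          have := pvCnt_le_pvM k hy
          simp only [beq_iff_eq]
          omega
        simp [hnil]
      have hx0 : ¬ pvCnt k x = 0 := by omega
      simp only [hMx, hCand, if_pos hgt, if_neg hx0, List.nil_append]
      simp [pvListMin]

-- B's pieces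
lemma best_eq_pvM (k : Int) (l : List Int) :
    (PySem.List.max? (l.map (pvCnt k)) (fun x => x)).getD 0 = pvM k l := by
  cases l with
  | nil => simp [pvM, PySem.List.max?]
  | cons a t =>
    simp only [List.map_cons, PySem.List.max?_id_cons, Option.getD_some]
    simp [pvM, List.foldl_map, max_eq_right (pvCnt_nonneg k a)]

lemma zip_filterMap_eq_filter (k b : Int) (l : List Int) :
    (l.zip (l.map (pvCnt k))).filterMap
        (fun p => if p.2 = b then some p.1 else none)
      = l.filter (fun x => pvCnt k x == b) := by
  induction l with
  | nil => rfl
  | cons a t ih =>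
    simp only [List.map_cons, List.zip_cons_cons, List.filterMap_cons, List.filter_cons]
    by_cases h : pvCnt k a = b
    · simp [h, ih]
    · simp [h, ih]

lemma alt_char (k : Int) (l : List Int) (nn : Int) :
    maxoccourence_alt l nn k =
      pvListMin ((if pvM k l = 0 then [0] else []) ++ pvCand k l) := by
  rw [maxoccourence_alt]
  simp only [best_eq_pvM, zip_filterMap_eq_filter]
  rw [← pvCand]
  by_cases hm : pvM k l = 0
  · rw [if_pos hm, if_pos hm]
    cases hc : pvCand k l with
    | nil => simp [PySem.List.min?_id_cons, pvListMin]
    | cons h t =>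
      rw [show (h :: t) ++ [0] = h :: (t ++ [0]) by rfl,
          PySem.List.min?_id_cons, Option.getD_some, List.foldl_append]
      simp only [List.foldl_cons, List.foldl_nil]
      rw [show ([0] : List Int) ++ h :: t = 0 :: h :: t by rfl]
      simp only [pvListMin, List.foldl_cons]
      rw [min_comm 0 h, foldl_min_min]
  · rw [if_neg hm, if_neg hm, List.nil_append]
    obtain ⟨y, hy, hcy⟩ := pvM_attained k l
      (lt_of_le_of_ne (pvM_nonneg k l) (Ne.symm hm))
    have hmem : y ∈ pvCand k l := by simp [pvCand, List.mem_filter, hy, hcy]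
    cases hc : pvCand k l with
    | nil => simp [hc] at hmem
    | cons h t => rw [PySem.List.min?_id_cons, Option.getD_some]; rfl

-- ===== VERDICT (by name: the statement is the Claim_ definition above) =====
theorem maxoccourence_spec : Claim_equal_maxoccourence := by
  intro arr n k _ _
  unfold Spec_maxoccourence maxoccourence
  rw [foldA_char, alt_char]
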